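-- pv_equiv track=rewrite | github.com/bceverly/sysmanage-agent | src/sysmanage_agent/operations/child_host_vmm_network_helpers.py | is_wired_interface
-- ===== SOURCE A (Python) =====
-- def is_wired_interface(iface_name: str) -> bool:
--     """Check if interface name indicates a wired connection."""
--     wired_prefixes = ["em", "re", "vio", "bge", "bnx", "ix", "msk", "sk"]
--     wireless_prefixes = ["iwn", "iwm", "athn", "ral", "rtw", "atu", "wi"]
--
--     for prefix in wired_prefixes:
--         if iface_name.startswith(prefix):
--             return True
--     for prefix in wireless_prefixes:
--         if iface_name.startswith(prefix):
--             return False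
--
--     # Unknown interface type, assume wired
--     return True
-- ===== SOURCE B (Python) =====
-- def is_wired_interface(iface_name: str) -> bool:
--     """Check if interface name indicates a wired connection."""
--     # Wired and wireless prefixes are disjoint and the default is wired,
--     # so the result is simply "does not start with a wireless prefix".
--     return not iface_name.startswith(("iwn", "iwm", "athn", "ral", "rtw", "atu", "wi"))
-- ===== Notes on version B (the rewrite author's own statement) =====
-- stated objective: simpler
-- what changed: Dropped the wired-prefix loop entirely: since the wired and wireless prefix lists are disjoint and the default is wired, B is one negated startswith over the wireless tuple instead of two sequential loops.
import Mathlib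
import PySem

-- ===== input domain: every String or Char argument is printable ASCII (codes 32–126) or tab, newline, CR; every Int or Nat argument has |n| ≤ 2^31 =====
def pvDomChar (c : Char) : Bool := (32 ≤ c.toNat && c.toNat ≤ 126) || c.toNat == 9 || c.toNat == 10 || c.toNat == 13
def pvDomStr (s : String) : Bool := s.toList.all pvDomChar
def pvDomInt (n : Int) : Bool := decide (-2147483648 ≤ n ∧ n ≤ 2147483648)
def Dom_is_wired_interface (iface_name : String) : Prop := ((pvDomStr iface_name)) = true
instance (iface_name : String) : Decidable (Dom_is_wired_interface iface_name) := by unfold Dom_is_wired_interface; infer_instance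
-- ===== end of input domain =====

-- B replaces A's two sequential prefix loops by a single negated wireless-prefix check (simpler; exact because the prefix lists are disjoint and the default is wired).


-- ===== PORT A =====
-- the early-return `for prefix in …: if iface_name.startswith(prefix): return …` loop
def pvLoopStarts (s : String) : List String → Bool
  | [] => false
  | p :: rest => if PySem.Str.startswith s p then true else pvLoopStarts s rest

def is_wired_interface (iface_name : String) : Bool :=
  let wired_prefixes := ["em", "re", "vio", "bge", "bnx", "ix", "msk", "sk"]
  let wireless_prefixes := ["iwn", "iwm", "athn", "ral", "rtw", "atu", "wi"]
  if pvLoopStarts iface_name wired_prefixes then true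
  else if pvLoopStarts iface_name wireless_prefixes then false
  else true

-- ===== PORT B =====
def is_wired_interface_alt (iface_name : String) : Bool :=
  !(["iwn", "iwm", "athn", "ral", "rtw", "atu", "wi"].any
      (fun p => PySem.Str.startswith iface_name p))

-- ===== PRECONDITION & SPEC =====
def Spec_is_wired_interface (iface_name : String) (out : Bool) : Prop := out = is_wired_interface_alt iface_name
instance (iface_name : String) (out : Bool) : Decidable (Spec_is_wired_interface iface_name out) := by unfold Spec_is_wired_interface; infer_instance

-- ===== CLAIM (what is proved, stated in full; the proofs are below) =====
def Claim_equal_is_wired_interface : Prop := ∀ (iface_name : String), Dom_is_wired_interface iface_name → Spec_is_wired_interface iface_name (is_wired_interface iface_name)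

-- ===== LEMMAS AND PROOFS =====

lemma pvLoopStarts_eq_any (s : String) (l : List String) :
    pvLoopStarts s l = l.any (fun p => PySem.Str.startswith s p) := by
  induction l with
  | nil => rfl
  | cons p rest ih => cases h : PySem.Str.startswith s p <;> simp [pvLoopStarts, h, ih]

-- no wired prefix is a prefix of a wireless one or vice versa
lemma pvDisj : ∀ p ∈ ["em", "re", "vio", "bge", "bnx", "ix", "msk", "sk"],
    ∀ q ∈ ["iwn", "iwm", "athn", "ral", "rtw", "atu", "wi"],
    ¬ (p.toList <+: q.toList) ∧ ¬ (q.toList <+: p.toList) := by decide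

lemma pvStarts_iff (s p : String) :
    PySem.Str.startswith s p = true ↔ p.toList <+: s.toList := by
  simp [PySem.Chars.startswith_iff]

lemma pvNoBoth (s : String)
    (h : ["iwn", "iwm", "athn", "ral", "rtw", "atu", "wi"].any
          (fun p => PySem.Str.startswith s p) = true) :
    ["em", "re", "vio", "bge", "bnx", "ix", "msk", "sk"].any
          (fun p => PySem.Str.startswith s p) = false := by
  rw [List.any_eq_true] at h
  obtain ⟨q, hq, hqs⟩ := h
  rw [List.any_eq_false]
  intro p hp
  simp only [Bool.not_eq_true]
  by_contra hps
  rw [Bool.not_eq_false, pvStarts_iff] at hps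
  rw [pvStarts_iff] at hqs
  rcases List.prefix_or_prefix_of_prefix hps hqs with hpq | hqp
  · exact (pvDisj p hp q hq).1 hpq
  · exact (pvDisj p hp q hq).2 hqp

-- ===== VERDICT (by name: the statement is the Claim_ definition above) =====
theorem is_wired_interface_spec : Claim_equal_is_wired_interface := by
  intro s _
  unfold Spec_is_wired_interface is_wired_interface is_wired_interface_alt
  simp only [pvLoopStarts_eq_any]
  rcases hwl : (["iwn", "iwm", "athn", "ral", "rtw", "atu", "wi"].any
      (fun p => PySem.Str.startswith s p)) with _ | _
  · simp
  · have hw := pvNoBoth s hwl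
    rw [hw]; rfl
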